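-- pv_equiv track=rewrite | github.com/Jeong-In-Lee/codingpractice | youtube/dp.py | subSodier
-- ===== SOURCE A (Python) =====
-- def subSodier(new):
--     before = new[0]
--     count = 0
--     for i in range(1, len(new)):
--         if before <= new[i]:
--             count += 1
--         else:
--             before = new[i]
--     return count
-- ===== SOURCE B (Python) =====
-- def subSodier(new):
--     # Count the strict left-to-right minima ("records") of new by repeatedly
--     # jumping to the next record: filter the remaining suffix to the elements
--     # strictly below the current record; its head is the next record.
--     # Answer = len(new) - (#records), since exactly the non-record positions
--     # (other than position 0) are counted by the original loop.
--     x, rest = new[0], new[1:]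
--     r = 1
--     while True:
--         smaller = [y for y in rest if y < x]
--         if not smaller:
--             break
--         r += 1
--         x, rest = smaller[0], smaller[1:]
--     return len(new) - r
-- ===== Notes on version B (the rewrite author's own statement) =====
-- stated objective: alternative
-- what changed: Instead of a single stateful scan counting comparisons against a running minimum, B counts the strict left-to-right minima (records) by repeatedly filtering the remaining suffix to elements below the current record and jumping to its head, then returns len(new) minus that record count.
import Mathlib
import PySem

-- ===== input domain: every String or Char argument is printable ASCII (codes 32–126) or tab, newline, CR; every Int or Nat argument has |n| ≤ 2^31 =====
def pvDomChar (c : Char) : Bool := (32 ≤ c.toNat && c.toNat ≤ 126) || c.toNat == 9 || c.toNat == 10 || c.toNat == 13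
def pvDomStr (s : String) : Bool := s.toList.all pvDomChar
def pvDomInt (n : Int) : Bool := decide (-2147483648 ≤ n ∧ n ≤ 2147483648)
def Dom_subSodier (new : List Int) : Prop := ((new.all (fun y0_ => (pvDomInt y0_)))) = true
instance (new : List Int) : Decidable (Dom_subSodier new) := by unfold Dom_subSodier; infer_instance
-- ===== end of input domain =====

-- B counts records (strict left-to-right minima) by filter-and-jump and returns
-- len(new) - #records, instead of A's single stateful comparison-counting scan
-- (objective: alternative algorithm, same result).

-- ===== PORT A =====
-- A: before = new[0]; then scan i = 1..len-1 carrying (before, count).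
def subSodier (new : List Int) : Int :=
  match new with
  | [] => 0  -- A raises IndexError here (new[0]); excluded by Pre_subSodier
  | b :: rest =>
    (rest.foldl (fun (s : Int × Int) x => if s.1 ≤ x then (s.1, s.2 + 1) else (x, s.2)) (b, 0)).2

-- ===== PORT B =====
-- Source B's while loop: from record x with suffix rest, filter to elements < x and
-- jump to the head of the result; r counts the records found.
def pvRecords (x : Int) (rest : List Int) : Int :=
  match h : rest.filter (fun y => decide (y < x)) with
  | [] => 1
  | s :: t => 1 + pvRecords s t
termination_by rest.length
decreasing_by
  have hle := List.length_filter_le (fun y => decide (y < x)) rest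
  rw [h] at hle; simp at hle; omega

def subSodier_alt (new : List Int) : Int :=
  match new with
  | [] => 0  -- Source B raises IndexError here (new[0]); excluded by Pre_subSodier
  | x :: rest => (new.length : Int) - pvRecords x rest

-- ===== PRECONDITION & SPEC =====
-- Pre_ excludes only the empty list, on which A (and B) raise IndexError.
def Pre_subSodier (new : List Int) : Prop := new ≠ []
instance (new : List Int) : Decidable (Pre_subSodier new) := by unfold Pre_subSodier; infer_instance
def pvWitness_subSodier : List Int := [3, 1, 2]

def Spec_subSodier (new : List Int) (out : Int) : Prop := out = subSodier_alt new
instance (new : List Int) (out : Int) : Decidable (Spec_subSodier new out) := by unfold Spec_subSodier; infer_instance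

-- ===== CLAIM (what is proved, stated in full; the proofs are below) =====
def Claim_equal_subSodier : Prop := ∀ (new : List Int), Dom_subSodier new → Pre_subSodier new → Spec_subSodier new (subSodier new)

-- ===== LEMMAS AND PROOFS =====
-- pvRecords x l depends only on l.filter (· < x).
theorem pvRecords_congr (x : Int) (l₁ l₂ : List Int)
    (h : l₁.filter (fun y => decide (y < x)) = l₂.filter (fun y => decide (y < x))) :
    pvRecords x l₁ = pvRecords x l₂ := by
  rw [pvRecords, pvRecords, h]

-- A's loop from state (b, c) over rest returns c + |rest| - (#records of b::rest - 1):
-- exactly the non-record steps increment the count.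
theorem pvLoop_eq (rest : List Int) : ∀ (b c : Int),
    (rest.foldl (fun (s : Int × Int) x => if s.1 ≤ x then (s.1, s.2 + 1) else (x, s.2)) (b, c)).2
      = c + (rest.length : Int) - (pvRecords b rest - 1) := by
  induction rest with
  | nil => intro b c; simp [pvRecords]
  | cons x xs ih =>
    intro b c
    simp only [List.foldl_cons]
    by_cases h : b ≤ x
    · have hf : (x :: xs).filter (fun y => decide (y < b)) = xs.filter (fun y => decide (y < b)) := by
        simp [not_lt.mpr h]
      have hr : pvRecords b (x :: xs) = pvRecords b xs := pvRecords_congr b _ _ hf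
      rw [if_pos h, ih, hr]
      simp; ring
    · have hx : x < b := not_le.mp h
      have hf : (x :: xs).filter (fun y => decide (y < b)) = x :: xs.filter (fun y => decide (y < b)) := by
        simp [hx]
      have hr : pvRecords b (x :: xs) = 1 + pvRecords x xs := by
        rw [pvRecords, hf]
        have : (xs.filter (fun y => decide (y < b))).filter (fun y => decide (y < x))
            = xs.filter (fun y => decide (y < x)) := by
          rw [List.filter_filter]
          apply List.filter_congr
          intro a _
          by_cases hax : a < x
          · simp [hax, lt_trans hax hx]
          · simp [hax]
        exact congrArg (1 + ·) (pvRecords_congr x _ _ this)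
      rw [if_neg h, ih, hr]
      simp; ring

-- ===== VERDICT (by name: the statement is the Claim_ definition above) =====
theorem subSodier_spec : Claim_equal_subSodier := by
  intro new _ hpre
  unfold Spec_subSodier subSodier subSodier_alt
  match new with
  | [] => exact absurd rfl hpre
  | b :: rest =>
    simp only [pvLoop_eq, List.length_cons]
    push_cast
    ring
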